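-- pv_equiv track=rewrite | github.com/pypi-data/pypi-mirror-213 | packages/numtoname/numtoname-0.3.1.tar.gz/numtoname-0.3.1/numtoname/helpers.py | base_generate_name_fixed
-- ===== SOURCE A (Python) =====
-- def base_generate_name_fixed(num: int, alphabet: str, name_length: int) -> str:
--     if num < 1 or alphabet is None or len(alphabet) < 1 or name_length < 1:
--         return ''
--
--     name_string = ""
--     running_length = num
--     alphabet_size = len(alphabet)
--     for i in range(name_length):
--         if running_length > 1 and running_length > (alphabet_size ** (name_length - i - 1)):
--             for j in range(alphabet_size):
--                 if running_length > ((alphabet_size - j - 1) * (alphabet_size ** (name_length - i - 1))):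
--                     name_string += alphabet[(alphabet_size - j - 1)]
--                     running_length -= ((alphabet_size - j - 1) * (alphabet_size ** (name_length - i - 1)))
--                     break
--         else:
--             name_string += alphabet[0]
--
--     return name_string
-- ===== SOURCE B (Python) =====
-- def base_generate_name_fixed(num: int, alphabet: str, name_length: int) -> str:
--     if num < 1 or alphabet is None or len(alphabet) < 1 or name_length < 1:
--         return ''
--     size = len(alphabet)
--     rem = num - 1
--     digits = []
--     for _ in range(name_length):
--         digits.append(rem % size)
--         rem //= size
--     if rem > 0:
--         return alphabet[size - 1] * name_length
--     return ''.join(alphabet[d] for d in reversed(digits))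
-- ===== Notes on version B (the rewrite author's own statement) =====
-- stated objective: faster
-- what changed: B builds the digits right-to-left by repeated divmod of num-1 by the alphabet size (all-max name if the value overflows the width), replacing A's left-to-right search that scans the whole alphabet and recomputes a big-int power at every position.
import Mathlib
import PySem

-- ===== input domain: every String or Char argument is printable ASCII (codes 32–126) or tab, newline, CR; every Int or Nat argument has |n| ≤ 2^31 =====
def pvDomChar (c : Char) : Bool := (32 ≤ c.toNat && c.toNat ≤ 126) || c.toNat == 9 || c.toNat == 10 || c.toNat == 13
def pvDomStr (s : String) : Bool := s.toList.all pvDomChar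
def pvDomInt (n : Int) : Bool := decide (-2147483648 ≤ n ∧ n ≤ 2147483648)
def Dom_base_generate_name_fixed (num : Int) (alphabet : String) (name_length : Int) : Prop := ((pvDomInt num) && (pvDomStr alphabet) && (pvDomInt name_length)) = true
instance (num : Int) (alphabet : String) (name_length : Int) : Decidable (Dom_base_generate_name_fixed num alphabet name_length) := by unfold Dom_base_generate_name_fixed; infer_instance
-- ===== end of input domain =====

-- B builds the digits right-to-left by repeated divmod of num-1 (all-max name on
-- overflow), replacing A's per-position alphabet scan and big-int powers
-- (objective: faster; a timing run measured A timing out where B returned).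

-- ===== PORT A =====
-- inner 'for j in range(alphabet_size): if … : append/subtract; break'
def pvAInner (al : List Char) (size p rl : Int) : List Int → Option (Char × Int)
  | [] => none
  | j :: rest =>
    if rl > (size - j - 1) * p then
      some ((PySem.List.pyGet? al (size - j - 1)).getD ' ', rl - (size - j - 1) * p)
    else pvAInner al size p rl rest

-- outer 'for i in range(name_length)'; fuel n = remaining iterations, i the Python index.
-- 'alphabet_size ** (name_length - i - 1)': the exponent is ≥ 0 on every iteration, so .toNat is exact.
def pvAOuter (al : List Char) (size L : Int) : Nat → Int → List Char → Int → List Char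
  | 0, _, name, _ => name
  | n+1, i, name, rl =>
    if rl > 1 ∧ rl > size ^ (L - i - 1).toNat then
      match pvAInner al size (size ^ (L - i - 1).toNat) rl (PySem.List.pyRange 0 size 1) with
      | some (c, rl') => pvAOuter al size L n (i+1) (name ++ [c]) rl'
      | none => pvAOuter al size L n (i+1) name rl
    else
      pvAOuter al size L n (i+1) (name ++ [(PySem.List.pyGet? al 0).getD ' ']) rl

def base_generate_name_fixed (num : Int) (alphabet : String) (name_length : Int) : String :=
  if num < 1 ∨ (alphabet.toList.length : Int) < 1 ∨ name_length < 1 then ""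
  else
    String.ofList (pvAOuter alphabet.toList (alphabet.toList.length : Int) name_length
      name_length.toNat 0 [] num)

-- ===== PORT B =====
-- 'for _ in range(name_length): digits.append(rem % size); rem //= size'
def pvB2Loop (size : Int) : Nat → Int → List Int × Int
  | 0, rem => ([], rem)
  | n+1, rem =>
    let r := pvB2Loop size n (PySem.Int.floordiv rem size)
    (PySem.Int.mod rem size :: r.1, r.2)

def base_generate_name_fixed_alt (num : Int) (alphabet : String) (name_length : Int) : String :=
  if num < 1 ∨ (alphabet.toList.length : Int) < 1 ∨ name_length < 1 then ""
  else
    -- rem after the divmod loop is (pvB2Loop …).2; digits are (pvB2Loop …).1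
    if (pvB2Loop (alphabet.toList.length : Int) name_length.toNat (num - 1)).2 > 0 then
      -- 'alphabet[size - 1] * name_length'
      String.ofList (List.replicate name_length.toNat
        ((PySem.List.pyGet? alphabet.toList ((alphabet.toList.length : Int) - 1)).getD ' '))
    else
      -- "''.join(alphabet[d] for d in reversed(digits))"
      String.ofList ((pvB2Loop (alphabet.toList.length : Int) name_length.toNat (num - 1)).1.reverse.map
        (fun d => (PySem.List.pyGet? alphabet.toList d).getD ' '))

-- ===== PRECONDITION & SPEC =====
def Spec_base_generate_name_fixed (num : Int) (alphabet : String) (name_length : Int) (out : String) : Prop := out = base_generate_name_fixed_alt num alphabet name_length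
instance (num : Int) (alphabet : String) (name_length : Int) (out : String) : Decidable (Spec_base_generate_name_fixed num alphabet name_length out) := by unfold Spec_base_generate_name_fixed; infer_instance

-- ===== CLAIM (what is proved, stated in full; the proofs are below) =====
def Claim_equal_base_generate_name_fixed : Prop := ∀ (num : Int) (alphabet : String) (name_length : Int), Dom_base_generate_name_fixed num alphabet name_length → Spec_base_generate_name_fixed num alphabet name_length (base_generate_name_fixed num alphabet name_length)

-- ===== LEMMAS AND PROOFS =====

-- proof-only intermediate loop: left-to-right capped digit extraction
-- one pass: digit = min(size-1, (remaining-1)//power), then power //= size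
def pvBLoop (al : List Char) (size : Int) : Nat → Int → Int → List Char → List Char
  | 0, _, _, acc => acc
  | n+1, power, remaining, acc =>
    let d0 := PySem.Int.floordiv (remaining - 1) power
    let d := if d0 > size - 1 then size - 1 else d0
    pvBLoop al size n (PySem.Int.floordiv power size) (remaining - d * power)
      (acc ++ [(PySem.List.pyGet? al d).getD ' '])

-- one unfolding step of pvBLoop with the lets substituted
theorem pvBLoop_step (al : List Char) (size : Int) (n : Nat) (power remaining : Int)
    (acc : List Char) :
    pvBLoop al size (n+1) power remaining acc =
      pvBLoop al size n (PySem.Int.floordiv power size)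
        (remaining - (if PySem.Int.floordiv (remaining - 1) power > size - 1 then size - 1
                      else PySem.Int.floordiv (remaining - 1) power) * power)
        (acc ++ [(PySem.List.pyGet? al
            (if PySem.Int.floordiv (remaining - 1) power > size - 1 then size - 1
             else PySem.Int.floordiv (remaining - 1) power)).getD ' ']) := rfl

-- A's inner search over the j-range starting at size-1-k returns the digit min(k, (rl-1)//p).
theorem pvAInner_spec (al : List Char) (p rl : Int) (hp : 0 < p) (hrl : 1 ≤ rl) :
    ∀ (k : Nat), (k : Int) ≤ (al.length : Int) - 1 →
    pvAInner al (al.length : Int) p rl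
        (PySem.List.pyRange ((al.length : Int) - 1 - k) (al.length : Int) 1)
      = some ((PySem.List.pyGet? al (min (k : Int) (PySem.Int.floordiv (rl - 1) p))).getD ' ',
              rl - min (k : Int) (PySem.Int.floordiv (rl - 1) p) * p) := by
  intro k
  induction k with
  | zero =>
    intro hk
    rw [PySem.List.pyRange_one_cons (by omega)]
    unfold pvAInner
    have hd0 : 0 ≤ PySem.Int.floordiv (rl - 1) p := by
      rw [PySem.Int.le_floordiv_iff_mul_le hp]
      omega
    have hmin : min ((0 : Nat) : Int) (PySem.Int.floordiv (rl - 1) p) = 0 := by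
      push_cast; omega
    rw [hmin]
    have h0 : ((al.length : Int) - ((al.length : Int) - 1 - ((0 : Nat) : Int)) - 1) = 0 := by
      push_cast; ring
    rw [h0, if_pos (by omega : rl > 0 * p)]
  | succ k ih =>
    intro hk
    rw [PySem.List.pyRange_one_cons (by omega)]
    unfold pvAInner
    set d0 := PySem.Int.floordiv (rl - 1) p with hd0def
    have hdig : ((al.length : Int) - ((al.length : Int) - 1 - ((k + 1 : Nat) : Int)) - 1)
        = ((k + 1 : Nat) : Int) := by push_cast; ring
    by_cases hc : ((k : Int) + 1) ≤ d0
    · have hcond : rl > ((al.length : Int) - ((al.length : Int) - 1 - ((k + 1 : Nat) : Int)) - 1) * p := by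
        rw [hdig]
        have h1 : ((k : Int) + 1) * p ≤ rl - 1 :=
          (PySem.Int.le_floordiv_iff_mul_le hp).mp hc
        push_cast; omega
      rw [if_pos hcond, hdig]
      have hmin : min ((k + 1 : Nat) : Int) d0 = ((k + 1 : Nat) : Int) := by push_cast; omega
      rw [hmin]
    · have hcond : ¬ rl > ((al.length : Int) - ((al.length : Int) - 1 - ((k + 1 : Nat) : Int)) - 1) * p := by
        rw [hdig]
        intro h
        apply hc
        rw [PySem.Int.le_floordiv_iff_mul_le hp]
        push_cast at h ⊢; omega
      rw [if_neg hcond]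
      have hstart : (al.length : Int) - 1 - ((k + 1 : Nat) : Int) + 1 = (al.length : Int) - 1 - (k : Int) := by
        push_cast; ring
      rw [hstart]
      have hmin : min ((k + 1 : Nat) : Int) d0 = min ((k : Nat) : Int) d0 := by push_cast; omega
      rw [hmin]
      exact ih (by omega)

-- the two loops agree, given the power invariant p = size^(n-1) and rl ≥ 1
theorem pv_loop_eq (al : List Char) (hal : 1 ≤ (al.length : Int)) (L : Int) :
    ∀ (n : Nat) (i rl p : Int) (acc : List Char),
      L - i = (n : Int) → 1 ≤ rl → (n = 0 ∨ p = (al.length : Int) ^ (n - 1)) →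
      pvAOuter al (al.length : Int) L n i acc rl = pvBLoop al (al.length : Int) n p rl acc := by
  intro n
  induction n with
  | zero => intro i rl p acc _ _ _; rfl
  | succ m ih =>
    intro i rl p acc hi hrl hpinv
    have hp : p = (al.length : Int) ^ m := by
      rcases hpinv with h | h
      · omega
      · simpa using h
    have hppos : 0 < p := by rw [hp]; positivity
    have hexp : (L - i - 1).toNat = m := by omega
    set size : Int := (al.length : Int) with hsize
    set d0 := PySem.Int.floordiv (rl - 1) p with hd0def
    have hd0nn : 0 ≤ d0 := by
      rw [hd0def, PySem.Int.le_floordiv_iff_mul_le hppos]; omega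
    have hd0p : d0 * p ≤ rl - 1 := (PySem.Int.le_floordiv_iff_mul_le hppos).mp le_rfl
    have hnextp : (m = 0 ∨ PySem.Int.floordiv p size = size ^ (m - 1)) := by
      cases m with
      | zero => exact Or.inl rfl
      | succ m' =>
        right
        rw [hp, pow_succ, mul_comm, Nat.succ_sub_one,
          PySem.Int.floordiv_eq_ediv_of_pos (by omega : (0:Int) < size)]
        exact Int.mul_ediv_cancel_left _ (by omega)
    rw [pvBLoop_step, ← hd0def]
    unfold pvAOuter
    rw [hexp, ← hp]
    set d := (if d0 > size - 1 then size - 1 else d0) with hddef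
    by_cases hc : rl > 1 ∧ rl > p
    · rw [if_pos hc]
      have hk : (((al.length - 1 : Nat) : Int)) ≤ size - 1 := by
        simp only [hsize]; omega
      have hkval : (((al.length - 1 : Nat) : Int)) = size - 1 := by
        simp only [hsize]; omega
      have hspec := pvAInner_spec al p rl hppos hrl (al.length - 1) (by rw [hkval])
      rw [show size - 1 - ((al.length - 1 : Nat) : Int) = 0 by omega] at hspec
      rw [← hd0def] at hspec
      rw [hspec]
      have hdeq : min (((al.length - 1 : Nat) : Int)) d0 = d := by
        rw [hkval, hddef]; split_ifs with h <;> omega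
      rw [hdeq]
      have hdle : d ≤ d0 := by rw [hddef]; split_ifs with h <;> omega
      have hdnn : 0 ≤ d := by rw [hddef]; split_ifs with h <;> omega
      have hrl' : 1 ≤ rl - d * p := by
        have hmul : d * p ≤ d0 * p := mul_le_mul_of_nonneg_right hdle hppos.le
        linarith
      exact ih (i + 1) (rl - d * p) (PySem.Int.floordiv p size) _ (by omega) hrl' hnextp
    · rw [if_neg hc]
      have hd0 : d0 = 0 := by
        rw [hd0def, PySem.Int.floordiv_eq_ediv_of_pos hppos]
        rcases (not_and_or.mp hc) with h | h
        · have hrl1 : rl = 1 := by omega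
          rw [hrl1]; simp
        · have hlt : rl - 1 < p := by omega
          exact Int.ediv_eq_zero_of_lt (by omega) hlt
      have hdeq : d = 0 := by rw [hddef, hd0]; rw [if_neg (by omega)]
      rw [hdeq]
      simp only [zero_mul, sub_zero]
      exact ih (i + 1) rl (PySem.Int.floordiv p size) _ (by omega) hrl hnextp


-- div/mod bridges (nonnegative dividend, positive divisor: Int ediv/emod = Nat div/mod)
theorem pv_ediv_ediv (a s : Int) (n : Nat) (ha : 0 ≤ a) (hs : 0 < s) :
    a / s / s ^ n = a / s ^ (n + 1) := by
  lift a to Nat using ha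
  lift s to Nat using hs.le
  norm_cast
  rw [Nat.div_div_eq_div_mul, pow_succ, Nat.mul_comm]

theorem pv_emod_ediv (a s : Int) (n : Nat) (ha : 0 ≤ a) (hs : 0 < s) :
    a % s ^ (n + 1) / s = a / s % s ^ n := by
  lift a to Nat using ha
  lift s to Nat using hs.le
  norm_cast
  rw [pow_succ', Nat.mod_mul_right_div_self]

-- peel the TOP digit of the right-to-left digit loop
theorem pvB2_snoc (s : Int) (hs : 0 < s) :
    ∀ (n : Nat) (a : Int), 0 ≤ a →
      (pvB2Loop s (n+1) a).1 = (pvB2Loop s n (a % s ^ n)).1 ++ [a / s ^ n % s] := by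
  intro n
  induction n with
  | zero =>
    intro a ha
    show [PySem.Int.mod a s] = [a / s ^ 0 % s]
    rw [PySem.Int.mod_eq_emod_of_pos hs, pow_zero, Int.ediv_one]
  | succ n ih =>
    intro a ha
    have hsp : (0:Int) < s ^ n := pow_pos hs n
    have hsp1 : (0:Int) < s ^ (n+1) := pow_pos hs (n+1)
    have hdivnn : 0 ≤ a / s := Int.ediv_nonneg ha hs.le
    have hmodnn : 0 ≤ a % s ^ (n+1) := Int.emod_nonneg a (by positivity)
    show PySem.Int.mod a s :: (pvB2Loop s (n+1) (PySem.Int.floordiv a s)).1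
        = (PySem.Int.mod (a % s ^ (n+1)) s
            :: (pvB2Loop s n (PySem.Int.floordiv (a % s ^ (n+1)) s)).1)
          ++ [a / s ^ (n+1) % s]
    simp only [PySem.Int.floordiv_eq_ediv_of_pos hs, PySem.Int.mod_eq_emod_of_pos hs]
    rw [ih (a / s) hdivnn,
        Int.emod_emod_of_dvd a (dvd_pow_self s (Nat.succ_ne_zero n)),
        pv_emod_ediv a s n ha hs,
        pv_ediv_ediv a s n ha hs]
    simp

-- the leftover rem after n divmod steps
theorem pvB2_rem (s : Int) (hs : 0 < s) :
    ∀ (n : Nat) (a : Int), 0 ≤ a → (pvB2Loop s n a).2 = a / s ^ n := by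
  intro n
  induction n with
  | zero => intro a ha; show a = a / s ^ 0; rw [pow_zero, Int.ediv_one]
  | succ n ih =>
    intro a ha
    show (pvB2Loop s n (PySem.Int.floordiv a s)).2 = a / s ^ (n+1)
    rw [PySem.Int.floordiv_eq_ediv_of_pos hs, ih (a / s) (Int.ediv_nonneg ha hs.le),
        pv_ediv_ediv a s n ha hs]

-- no overflow: the capped left-to-right loop emits exactly the reversed divmod digits
theorem pv_mid_eq_b2 (al : List Char) (hal : 1 ≤ (al.length : Int)) :
    ∀ (n : Nat) (rl p : Int) (acc : List Char),
      1 ≤ rl → rl - 1 < (al.length : Int) ^ n → (n = 0 ∨ p = (al.length : Int) ^ (n - 1)) →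
      pvBLoop al (al.length : Int) n p rl acc
        = acc ++ ((pvB2Loop (al.length : Int) n (rl - 1)).1.reverse.map
            (fun d => (PySem.List.pyGet? al d).getD ' ')) := by
  intro n
  induction n with
  | zero => intro rl p acc _ _ _; simp [pvBLoop, pvB2Loop]
  | succ n ih =>
    intro rl p acc hrl hlt hpinv
    have hs : (0:Int) < (al.length : Int) := by omega
    have hspn : (0:Int) < (al.length : Int) ^ n := pow_pos hs n
    have hp : p = (al.length : Int) ^ n := by
      rcases hpinv with h | h
      · omega
      · simpa using h
    have hlt' : rl - 1 < (al.length : Int) * (al.length : Int) ^ n := by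
      rw [← pow_succ']; exact hlt
    have hd0lt : (rl - 1) / (al.length : Int) ^ n < (al.length : Int) :=
      Int.ediv_lt_iff_lt_mul hspn |>.mpr hlt'
    have hd0nn : 0 ≤ (rl - 1) / (al.length : Int) ^ n := Int.ediv_nonneg (by omega) hspn.le
    rw [pvBLoop_step, hp, PySem.Int.floordiv_eq_ediv_of_pos hspn, if_neg (by omega)]
    have hnextp : (n = 0 ∨ PySem.Int.floordiv ((al.length : Int) ^ n) (al.length : Int)
        = (al.length : Int) ^ (n - 1)) := by
      cases n with
      | zero => exact Or.inl rfl
      | succ m =>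
        right
        rw [pow_succ, mul_comm, Nat.succ_sub_one,
          PySem.Int.floordiv_eq_ediv_of_pos hs]
        exact Int.mul_ediv_cancel_left _ (by omega)
    have harg : rl - (rl - 1) / (al.length : Int) ^ n * (al.length : Int) ^ n - 1
        = (rl - 1) % (al.length : Int) ^ n := by
      rw [Int.emod_def]; ring
    have hmodnn : 0 ≤ (rl - 1) % (al.length : Int) ^ n := Int.emod_nonneg _ (by omega)
    have hmodlt : (rl - 1) % (al.length : Int) ^ n < (al.length : Int) ^ n :=
      Int.emod_lt_of_pos _ hspn
    rw [ih (rl - (rl - 1) / (al.length : Int) ^ n * (al.length : Int) ^ n) _ _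
      (by omega) (by omega) hnextp]
    rw [harg, pvB2_snoc (al.length : Int) hs n (rl - 1) (by omega),
      Int.emod_eq_of_lt hd0nn hd0lt]
    simp

-- overflow: every position caps at the top digit
theorem pv_mid_overflow (al : List Char) (hal : 1 ≤ (al.length : Int)) :
    ∀ (n : Nat) (rl p : Int) (acc : List Char),
      (al.length : Int) ^ n ≤ rl - 1 → (n = 0 ∨ p = (al.length : Int) ^ (n - 1)) →
      pvBLoop al (al.length : Int) n p rl acc
        = acc ++ List.replicate n ((PySem.List.pyGet? al ((al.length : Int) - 1)).getD ' ') := by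
  intro n
  induction n with
  | zero => intro rl p acc _ _; simp [pvBLoop]
  | succ n ih =>
    intro rl p acc hov hpinv
    have hs : (0:Int) < (al.length : Int) := by omega
    have hspn : (0:Int) < (al.length : Int) ^ n := pow_pos hs n
    have hp : p = (al.length : Int) ^ n := by
      rcases hpinv with h | h
      · omega
      · simpa using h
    have hov' : (al.length : Int) * (al.length : Int) ^ n ≤ rl - 1 := by
      rw [← pow_succ']; exact hov
    have hd0ge : (al.length : Int) ≤ (rl - 1) / (al.length : Int) ^ n :=
      (Int.le_ediv_iff_mul_le hspn).mpr hov'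
    rw [pvBLoop_step, hp, PySem.Int.floordiv_eq_ediv_of_pos hspn, if_pos (by omega)]
    have hnextp : (n = 0 ∨ PySem.Int.floordiv ((al.length : Int) ^ n) (al.length : Int)
        = (al.length : Int) ^ (n - 1)) := by
      cases n with
      | zero => exact Or.inl rfl
      | succ m =>
        right
        rw [pow_succ, mul_comm, Nat.succ_sub_one,
          PySem.Int.floordiv_eq_ediv_of_pos hs]
        exact Int.mul_ediv_cancel_left _ (by omega)
    have hsub : ((al.length : Int) - 1) * (al.length : Int) ^ n
        = (al.length : Int) * (al.length : Int) ^ n - (al.length : Int) ^ n := by ring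
    rw [ih (rl - ((al.length : Int) - 1) * (al.length : Int) ^ n) _ _ (by omega) hnextp]
    simp [List.replicate_succ]

-- ===== VERDICT (by name: the statement is the Claim_ definition above) =====
theorem base_generate_name_fixed_spec : Claim_equal_base_generate_name_fixed := by
  intro num alphabet name_length _
  unfold Spec_base_generate_name_fixed base_generate_name_fixed base_generate_name_fixed_alt
  by_cases hg : num < 1 ∨ (alphabet.toList.length : Int) < 1 ∨ name_length < 1
  · rw [if_pos hg, if_pos hg]
  · rw [if_neg hg, if_neg hg]
    push Not at hg
    obtain ⟨h1, h2, h3⟩ := hg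
    have hs : (0:Int) < (alphabet.toList.length : Int) := by omega
    have hA : pvAOuter alphabet.toList (alphabet.toList.length : Int) name_length
        name_length.toNat 0 [] num
        = pvBLoop alphabet.toList (alphabet.toList.length : Int) name_length.toNat
            ((alphabet.toList.length : Int) ^ (name_length - 1).toNat) num [] :=
      pv_loop_eq alphabet.toList h2 name_length name_length.toNat 0 num _ []
        (by omega) (by omega) (Or.inr (by congr 1; omega))
    have hrem : (pvB2Loop (alphabet.toList.length : Int) name_length.toNat (num - 1)).2
        = (num - 1) / (alphabet.toList.length : Int) ^ name_length.toNat :=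
      pvB2_rem _ hs _ _ (by omega)
    have hspn : (0:Int) < (alphabet.toList.length : Int) ^ name_length.toNat :=
      pow_pos hs _
    by_cases hov : (alphabet.toList.length : Int) ^ name_length.toNat ≤ num - 1
    · have hpos : 0 < (num - 1) / (alphabet.toList.length : Int) ^ name_length.toNat := by
        have := (Int.le_ediv_iff_mul_le hspn).mpr (by omega : 1 * (alphabet.toList.length : Int) ^ name_length.toNat ≤ num - 1)
        omega
      rw [if_pos (by rw [hrem]; exact hpos), hA,
        pv_mid_overflow alphabet.toList h2 name_length.toNat num
          ((alphabet.toList.length : Int) ^ (name_length - 1).toNat) []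
          hov (Or.inr (by congr 1; omega))]
      rw [List.nil_append]
    · have hz : (num - 1) / (alphabet.toList.length : Int) ^ name_length.toNat = 0 :=
        Int.ediv_eq_zero_of_lt (by omega) (by omega)
      rw [if_neg (by rw [hrem, hz]; omega), hA,
        pv_mid_eq_b2 alphabet.toList h2 name_length.toNat num
          ((alphabet.toList.length : Int) ^ (name_length - 1).toNat) []
          (by omega) (by omega) (Or.inr (by congr 1; omega))]
      rw [List.nil_append]
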